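-- pv_equiv track=rewrite | github.com/Huluvu424242/lizenzkatalog | src/liz2standoff.py | unquote_value
-- ===== SOURCE A (Python) =====
-- DOPPELTES_HOCHKOMMA = '"'
--
-- def lastpos(content: str) -> int:
--     return len(content) - 1
--
-- def nextpos(pos: int) -> int:
--     return pos + 1
--
-- def last_char(content: str) -> str:
--     return content[-1]
--
-- def first_char(content: str) -> str:
--     return content[0]
--
-- def is_string_part(content: str) -> bool:
--     return (
--             len(content) >= 2
--             and first_char(content) == DOPPELTES_HOCHKOMMA
--             and last_char(content) == DOPPELTES_HOCHKOMMA
--     )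
--
-- def unquote_value(content: str | None) -> str:
--     if content is None:
--         return ""
--     content = content.strip()
--     if is_string_part(content):
--         unquoted_value: list[str] = []
--         pos: int = 1
--         while pos < lastpos(content):
--             cur_char = content[pos]
--             if cur_char == "\\" and nextpos(pos) < lastpos(content):
--                 next_char = content[nextpos(pos)]
--                 if next_char == "n":
--                     unquoted_value.append("\n")
--                 elif next_char == "t":
--                     unquoted_value.append("\t")
--                 elif next_char in [DOPPELTES_HOCHKOMMA, "\\", "[", "]"]:
--                     unquoted_value.append(next_char)
--                 else:
--                     unquoted_value.append(next_char)
--                 pos += 2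
--             else:
--                 unquoted_value.append(cur_char)
--                 pos = nextpos(pos)
--         return "".join(unquoted_value)
--     return content
-- ===== SOURCE B (Python) =====
-- DOPPELTES_HOCHKOMMA = '"'
--
-- _ESC = {"n": "\n", "t": "\t"}
--
-- def _unescape(s: str) -> str:
--     if s == "":
--         return ""
--     if s[0] == "\\" and len(s) >= 2:
--         return _ESC.get(s[1], s[1]) + _unescape(s[2:])
--     return s[0] + _unescape(s[1:])
--
-- def unquote_value(content: str | None) -> str:
--     if content is None:
--         return ""
--     content = content.strip()
--     if len(content) >= 2 and content[0] == DOPPELTES_HOCHKOMMA and content[-1] == DOPPELTES_HOCHKOMMA: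
--         return _unescape(content[1:-1])
--     return content
-- ===== Notes on version B (the rewrite author's own statement) =====
-- stated objective: simpler
-- what changed: Replaces A's index-based while loop with bounds arithmetic (lastpos/nextpos, append-to-list-and-join) by a direct structural recursion on the inner string that consumes a backslash escape pair (table lookup) or one plain character per step.
import Mathlib
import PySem

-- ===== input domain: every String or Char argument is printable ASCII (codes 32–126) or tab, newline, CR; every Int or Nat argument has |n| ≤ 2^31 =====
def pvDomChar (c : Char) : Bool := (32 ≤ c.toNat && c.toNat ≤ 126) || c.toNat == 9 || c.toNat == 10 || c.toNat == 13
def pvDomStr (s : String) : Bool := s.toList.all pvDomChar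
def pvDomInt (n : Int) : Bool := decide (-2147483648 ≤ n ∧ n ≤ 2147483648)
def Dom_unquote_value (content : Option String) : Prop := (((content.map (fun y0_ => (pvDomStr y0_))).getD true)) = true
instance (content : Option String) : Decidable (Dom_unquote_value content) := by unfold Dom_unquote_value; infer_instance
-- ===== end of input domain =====

-- B replaces A's index-based while loop (lastpos/nextpos arithmetic, list append + join) by a direct
-- structural recursion on the inner string consuming an escape pair or one plain char per step (simpler).
-- Python characters are 1-char strings; both ports compare Char values, which is exact on this domain.

-- ===== PORT A =====
def lastpos (content : List Char) : Int := (content.length : Int) - 1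

def nextpos (pos : Int) : Int := pos + 1

-- content[-1] / content[0]; only evaluated under the 'len(content) >= 2' guard, where pyGetD is exact
def last_char (content : List Char) : Char := PySem.List.pyGetD content (-1) ' '

def first_char (content : List Char) : Char := PySem.List.pyGetD content 0 ' '

def is_string_part (content : List Char) : Bool :=
  decide (2 ≤ content.length) && (first_char content == '"') && (last_char content == '"')

-- the while loop of A; fuel only bounds the iteration count (it never runs out for the fuel
-- passed below); content[pos] via pyGetD is exact since the guards keep 0 <= pos < len(content)
def unqLoopA (content : List Char) : Nat → Int → List Char → List Char
  | 0, _, acc => acc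
  | fuel + 1, pos, acc =>
    if pos < lastpos content then
      -- cur_char = content[pos]; next_char = content[nextpos(pos)] (inlined locals)
      if PySem.List.pyGetD content pos ' ' = '\\' ∧ nextpos pos < lastpos content then
        unqLoopA content fuel (pos + 2)
          (acc ++ [if PySem.List.pyGetD content (nextpos pos) ' ' = 'n' then '\n'
                   else if PySem.List.pyGetD content (nextpos pos) ' ' = 't' then '\t'
                   else if PySem.List.pyGetD content (nextpos pos) ' ' = '"' ∨
                           PySem.List.pyGetD content (nextpos pos) ' ' = '\\' ∨
                           PySem.List.pyGetD content (nextpos pos) ' ' = '[' ∨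
                           PySem.List.pyGetD content (nextpos pos) ' ' = ']' then
                     PySem.List.pyGetD content (nextpos pos) ' '
                   else PySem.List.pyGetD content (nextpos pos) ' '])
      else
        unqLoopA content fuel (nextpos pos) (acc ++ [PySem.List.pyGetD content pos ' '])
    else acc

def unquote_value (content : Option String) : String :=
  match content with
  | none => ""
  | some c =>
    let cs := (PySem.Str.strip c).toList
    if is_string_part cs then String.ofList (unqLoopA cs (lastpos cs - 1).toNat 1 []) else String.ofList cs

-- ===== PORT B =====
def escTable : PySem.Dict Char Char := PySem.Dict.ofList [('n', '\n'), ('t', '\t')]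

def unescape : List Char → List Char
  | [] => []
  | [c] => [c]                 -- s[0] + _unescape('') (the len(s) >= 2 test fails)
  | c :: d :: rest =>
    if c = '\\' then PySem.Dict.getD escTable d d :: unescape rest
    else c :: unescape (d :: rest)

def unquote_value_alt (content : Option String) : String :=
  match content with
  | none => ""
  | some c =>
    let cs := (PySem.Str.strip c).toList
    if decide (2 ≤ cs.length) && (PySem.List.pyGetD cs 0 ' ' == '"') && (PySem.List.pyGetD cs (-1) ' ' == '"') then
      String.ofList (unescape (PySem.List.slice cs (some 1) (some (-1))))
    else String.ofList cs

-- ===== PRECONDITION & SPEC =====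
def Spec_unquote_value (content : Option String) (out : String) : Prop := out = unquote_value_alt content
instance (content : Option String) (out : String) : Decidable (Spec_unquote_value content out) := by unfold Spec_unquote_value; infer_instance

-- ===== CLAIM (what is proved, stated in full; the proofs are below) =====
def Claim_equal_unquote_value : Prop := ∀ (content : Option String), Dom_unquote_value content → Spec_unquote_value content (unquote_value content)

-- ===== LEMMAS AND PROOFS =====

lemma unescape_cons_of_ne (c : Char) (rest : List Char) (h : c ≠ '\\') :
    unescape (c :: rest) = c :: unescape rest := by
  cases rest with
  | nil => simp [unescape]
  | cons d r => simp [unescape, h]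

lemma unescape_backslash (d : Char) (rest : List Char) :
    unescape ('\\' :: d :: rest) = PySem.Dict.getD escTable d d :: unescape rest := by
  simp [unescape]

lemma escTable_getD (d : Char) :
    PySem.Dict.getD escTable d d =
      (if d = 'n' then '\n' else if d = 't' then '\t'
       else if d = '"' ∨ d = '\\' ∨ d = '[' ∨ d = ']' then d else d) := by
  by_cases hn : d = 'n'
  · subst hn; decide
  by_cases ht : d = 't'
  · subst ht; decide
  have h1 : ('n' == d) = false := beq_eq_false_iff_ne.mpr (Ne.symm hn)
  have h2 : ('t' == d) = false := beq_eq_false_iff_ne.mpr (Ne.symm ht)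
  rw [show escTable = PySem.Dict.mk [('n', '\n'), ('t', '\t')] from rfl]
  simp [PySem.Dict.getD, PySem.Dict.get?, h1, h2, hn, ht]

lemma take_pred_length (cs : List Char) :
    (cs.take (cs.length - 1)).length = cs.length - 1 := by
  simp [List.length_take]

lemma unescape_nil : unescape [] = [] := rfl

lemma drop_cons_pyGetD (cs : List Char) (pos : Int) (hpos : 0 ≤ pos)
    (hlt : pos < (cs.length : Int) - 1) :
    (cs.take (cs.length - 1)).drop pos.toNat
      = PySem.List.pyGetD cs pos ' ' :: (cs.take (cs.length - 1)).drop (pos.toNat + 1) := by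
  have hp : pos.toNat < (cs.take (cs.length - 1)).length := by
    rw [take_pred_length]; omega
  rw [List.drop_eq_getElem_cons hp]
  congr 1
  rw [List.getElem_take]
  symm
  apply PySem.List.pyGetD_eq_getElem <;> omega

lemma unqLoopA_eq (cs : List Char) (fuel : Nat) :
    ∀ (pos : Int) (acc : List Char), (lastpos cs - pos).toNat ≤ fuel → 0 ≤ pos →
    unqLoopA cs fuel pos acc = acc ++ unescape ((cs.take (cs.length - 1)).drop pos.toNat) := by
  induction fuel with
  | zero =>
    intro pos acc hk hpos
    have hnil : (cs.take (cs.length - 1)).drop pos.toNat = [] := by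
      apply List.drop_eq_nil_of_le
      rw [take_pred_length]
      simp only [lastpos] at hk
      omega
    rw [unqLoopA, hnil, unescape_nil]
    simp
  | succ fuel IH =>
    intro pos acc hk hpos
    by_cases h : pos < lastpos cs
    · have hL : pos < (cs.length : Int) - 1 := by simpa [lastpos] using h
      by_cases hc : PySem.List.pyGetD cs pos ' ' = '\\' ∧ nextpos pos < lastpos cs
      · have hL2 : pos + 1 < (cs.length : Int) - 1 := by
          have h2 := hc.2; simp only [nextpos, lastpos] at h2; omega
        have hd1 := drop_cons_pyGetD cs pos hpos hL
        have hd2 := drop_cons_pyGetD cs (pos + 1) (by omega) hL2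
        rw [show (pos + 1).toNat = pos.toNat + 1 from by omega,
            show pos.toNat + 1 + 1 = pos.toNat + 2 from by omega] at hd2
        rw [unqLoopA, if_pos h, if_pos hc,
            IH (pos + 2) _ (by simp only [lastpos] at hk ⊢; omega) (by omega),
            show (pos + 2).toNat = pos.toNat + 2 from by omega,
            hd1, hd2,
            show PySem.List.pyGetD cs (pos + 1) ' ' = PySem.List.pyGetD cs (nextpos pos) ' ' from rfl,
            hc.1, unescape_backslash, escTable_getD]
        simp
      · have hd1 := drop_cons_pyGetD cs pos hpos hL
        have key : unescape (PySem.List.pyGetD cs pos ' ' :: (cs.take (cs.length - 1)).drop (pos.toNat + 1))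
            = PySem.List.pyGetD cs pos ' ' :: unescape ((cs.take (cs.length - 1)).drop (pos.toNat + 1)) := by
          by_cases hcc : PySem.List.pyGetD cs pos ' ' = '\\'
          · have hge : ¬ nextpos pos < lastpos cs := fun hlt => hc ⟨hcc, hlt⟩
            have hnil : (cs.take (cs.length - 1)).drop (pos.toNat + 1) = [] := by
              apply List.drop_eq_nil_of_le
              rw [take_pred_length]
              simp only [nextpos, lastpos, not_lt] at hge
              omega
            rw [hnil, hcc]
            simp [unescape]
          · exact unescape_cons_of_ne _ _ hcc
        rw [unqLoopA, if_pos h, if_neg hc,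
            IH (nextpos pos) _ (by simp only [lastpos, nextpos] at hk ⊢; omega)
              (by simp only [nextpos]; omega),
            show (nextpos pos).toNat = pos.toNat + 1 from by simp only [nextpos]; omega,
            hd1, key]
        simp
    · have hnil : (cs.take (cs.length - 1)).drop pos.toNat = [] := by
        apply List.drop_eq_nil_of_le
        rw [take_pred_length]
        simp only [lastpos, not_lt] at h
        omega
      rw [unqLoopA, if_neg h, hnil, unescape_nil]
      simp

lemma slice_one_neg_one (cs : List Char) (h : 2 ≤ cs.length) :
    PySem.List.slice cs (some 1) (some (-1)) = (cs.take (cs.length - 1)).drop 1 := by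
  have hdt : (cs.take (cs.length - 1)).drop 1 = (cs.drop 1).take (cs.length - 1 - 1) :=
    List.drop_take
  rw [hdt]
  simp only [PySem.List.slice, PySem.List.clampIdx]
  norm_num
  have hne : cs ≠ [] := by intro e; simp [e] at h
  rw [if_neg hne,
      show min 1 cs.length = 1 from by omega,
      show ((cs.length : Int) + -1).toNat = cs.length - 1 from by omega,
      List.drop_one]

theorem unquote_value_eq_alt (content : Option String) :
    unquote_value content = unquote_value_alt content := by
  cases content with
  | none => rfl
  | some c =>
    simp only [unquote_value, unquote_value_alt, is_string_part, first_char, last_char]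
    by_cases hq : (decide (2 ≤ (PySem.Str.strip c).toList.length)
        && (PySem.List.pyGetD (PySem.Str.strip c).toList 0 ' ' == '"')
        && (PySem.List.pyGetD (PySem.Str.strip c).toList (-1) ' ' == '"')) = true
    · rw [if_pos hq, if_pos hq]
      have hlen : 2 ≤ (PySem.Str.strip c).toList.length := by
        have := hq; simp only [Bool.and_eq_true, decide_eq_true_eq] at this
        exact this.1.1
      rw [slice_one_neg_one _ hlen, unqLoopA_eq (PySem.Str.strip c).toList _ 1 [] le_rfl (by omega)]
      norm_num
    · rw [if_neg hq, if_neg hq]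

-- ===== VERDICT (by name: the statement is the Claim_ definition above) =====
theorem unquote_value_spec : Claim_equal_unquote_value := by
  intro content _
  unfold Spec_unquote_value
  exact unquote_value_eq_alt content
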